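-- pv_equiv track=rewrite | github.com/Santiib/tp_3 | grafo.py | _label_mayor_frecuencia
-- ===== SOURCE A (Python) =====
-- import operator
--
-- def _label_mayor_frecuencia(vertice, adyacentes, label):
-- 	''' Devuelve el label con mayor frecuencia entre los adyacentes del vertice actual.
-- 	Parametros:
-- 		- vertice: vertice actual.
-- 		- adyacentes: lista de adyacentes al vertice.
-- 		- label: diccionario de los vertices con su label actual.
-- 	'''
-- 	labels = {}
-- 	for ady in adyacentes:
-- 		if label[ady] in labels:
-- 			labels[label[ady]] += 1
-- 		else:
-- 			labels[ady] = 1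
-- 	labels_lista = sorted(labels.items(), key=operator.itemgetter(1))
--
-- 	misma_frecuencia = False
-- 	if labels_lista[0] == labels_lista[-1]:
-- 			misma_frecuencia = True
--
-- 	return labels_lista[len(labels_lista)-1][0], misma_frecuencia
-- ===== SOURCE B (Python) =====
-- def _label_mayor_frecuencia(vertice, adyacentes, label):
--     ''' Same contract as A: most frequent label among the neighbours (A's
--     counting rule kept verbatim, including the else-branch keyed by ady),
--     but the best entry is picked in one pass over insertion order instead
--     of sorting, and misma_frecuencia is just len(labels) == 1. '''
--     labels = {}
--     for ady in adyacentes: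
--         lab = label[ady]
--         if lab in labels:
--             labels[lab] += 1
--         else:
--             labels[ady] = 1
--     best = None
--     for item in labels.items():
--         if best is None or best[1] <= item[1]:
--             best = item
--     return best[0], len(labels) == 1
-- ===== Notes on version B (the rewrite author's own statement) =====
-- stated objective: simpler
-- what changed: B keeps A's counting loop (bug included) but replaces the sort of the frequency table by a single running-max scan over the items in insertion order (>= so the last maximum wins, matching the stable sort's last element) and computes misma_frecuencia as len(labels) == 1 instead of comparing first and last of the sorted list.
import Mathlib
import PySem

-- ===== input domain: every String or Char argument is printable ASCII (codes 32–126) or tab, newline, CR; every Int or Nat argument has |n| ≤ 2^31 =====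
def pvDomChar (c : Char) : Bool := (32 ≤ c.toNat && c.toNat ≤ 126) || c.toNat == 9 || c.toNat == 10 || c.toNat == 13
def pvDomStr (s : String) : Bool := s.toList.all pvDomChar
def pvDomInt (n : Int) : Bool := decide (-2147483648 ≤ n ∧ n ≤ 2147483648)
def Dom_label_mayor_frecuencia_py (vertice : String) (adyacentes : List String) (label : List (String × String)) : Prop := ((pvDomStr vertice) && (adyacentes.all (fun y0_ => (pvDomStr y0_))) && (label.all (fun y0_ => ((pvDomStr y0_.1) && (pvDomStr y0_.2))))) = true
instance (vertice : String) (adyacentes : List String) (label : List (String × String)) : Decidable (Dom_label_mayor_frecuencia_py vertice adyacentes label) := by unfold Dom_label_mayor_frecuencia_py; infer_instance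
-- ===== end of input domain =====

-- B replaces A's sort of the frequency table by a single max-scan over the
-- items in insertion order (objective: simpler; A's counting rule, including
-- its ady-keyed else-branch, is kept verbatim in both).


-- ===== PORT A =====
-- the counting loop both Pythons share verbatim (A's bug included: the
-- else-branch inserts under the key `ady`, not under `label[ady]`);
-- `none` = the KeyError `label[ady]` raises on a missing neighbour
def pvCountLabels (d0 : PySem.Dict String String) : List String → PySem.Dict String Int → Option (PySem.Dict String Int)
  | [], labels => some labels
  | ady :: rest, labels =>
    match d0.get? ady with
    | none => none
    | some v =>
      pvCountLabels d0 rest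
        (if labels.contains v then labels.modify v 0 (· + 1) else labels.insert ady 1)

def label_mayor_frecuencia_py (vertice : String) (adyacentes : List String) (label : List (String × String)) : String × Bool :=
  match pvCountLabels (PySem.Dict.mk label) adyacentes PySem.Dict.empty with
  | none => ("", false)   -- KeyError: excluded by Pre_
  | some labels =>
    let labels_lista := PySem.List.sorted labels.items (fun p => p.2)
    match PySem.List.pyGet? labels_lista 0, PySem.List.pyGet? labels_lista (-1),
          PySem.List.pyGet? labels_lista ((labels_lista.length : Int) - 1) with
    | some a0, some an, some ax => (ax.1, decide (a0 = an))
    | _, _, _ => ("", false)   -- IndexError on the empty table: excluded by Pre_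

-- ===== PORT B =====
-- B's scan step: keep the incumbent unless the new item's count is ≥ (so the
-- last maximal item in insertion order wins, as `best[1] <= item[1]` does)
def pvBestStep (best : Option (String × Int)) (item : String × Int) : Option (String × Int) :=
  match best with
  | none => some item
  | some b => if b.2 ≤ item.2 then some item else some b

def label_mayor_frecuencia_py_alt (vertice : String) (adyacentes : List String) (label : List (String × String)) : String × Bool :=
  match pvCountLabels (PySem.Dict.mk label) adyacentes PySem.Dict.empty with
  | none => ("", false)   -- KeyError: excluded by Pre_
  | some labels =>
    match labels.items.foldl pvBestStep none with
    | none => ("", false)   -- best is None (TypeError in Python): excluded by Pre_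
    | some best => (best.1, decide (labels.size = 1))

-- ===== PRECONDITION & SPEC =====
-- Pre_ excludes exactly the raising inputs: empty `adyacentes` (IndexError in
-- A) and a neighbour missing from `label` (KeyError in A).
def Pre_label_mayor_frecuencia_py (vertice : String) (adyacentes : List String) (label : List (String × String)) : Prop :=
  adyacentes ≠ [] ∧ ∀ a ∈ adyacentes, ((PySem.Dict.mk label).get? a).isSome = true
instance (vertice : String) (adyacentes : List String) (label : List (String × String)) : Decidable (Pre_label_mayor_frecuencia_py vertice adyacentes label) := by unfold Pre_label_mayor_frecuencia_py; infer_instance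

def pvWitness_label_mayor_frecuencia_py : String × List String × (List (String × String)) :=
  ("v", ["a", "b", "a"], [("a", "X"), ("b", "Y")])

def Spec_label_mayor_frecuencia_py (vertice : String) (adyacentes : List String) (label : List (String × String)) (out : String × Bool) : Prop := out = label_mayor_frecuencia_py_alt vertice adyacentes label
instance (vertice : String) (adyacentes : List String) (label : List (String × String)) (out : String × Bool) : Decidable (Spec_label_mayor_frecuencia_py vertice adyacentes label out) := by unfold Spec_label_mayor_frecuencia_py; infer_instance

-- ===== CLAIM (what is proved, stated in full; the proofs are below) =====
def Claim_equal_label_mayor_frecuencia_py : Prop := ∀ (vertice : String) (adyacentes : List String) (label : List (String × String)), Dom_label_mayor_frecuencia_py vertice adyacentes label → Pre_label_mayor_frecuencia_py vertice adyacentes label → Spec_label_mayor_frecuencia_py vertice adyacentes label (label_mayor_frecuencia_py vertice adyacentes label)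

-- ===== LEMMAS AND PROOFS =====

-- size is the length of the key list
theorem pv_size_eq_keys_length (d : PySem.Dict String Int) : d.size = d.keys.length := by
  simp [PySem.Dict.size, PySem.Dict.keys]

-- the counting loop succeeds when every neighbour is in the dict, keeps the
-- keys nodup, and never shrinks the table
theorem pvCountLabels_spec (d0 : PySem.Dict String String) :
    ∀ (ads : List String) (labels r : PySem.Dict String Int),
      pvCountLabels d0 ads labels = some r → labels.keys.Nodup →
      r.keys.Nodup ∧ labels.size ≤ r.size := by
  intro ads
  induction ads with
  | nil => intro labels r h hn; cases h; exact ⟨hn, le_refl _⟩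
  | cons a rest ih =>
    intro labels r h hn
    cases hv : d0.get? a with
    | none => simp only [pvCountLabels, hv] at h; exact absurd h (by simp)
    | some v =>
      simp only [pvCountLabels, hv] at h
      by_cases hc : labels.contains v = true
      · rw [if_pos hc] at h
        have hn' : (labels.modify v 0 (· + 1)).keys.Nodup := by
          rw [PySem.Dict.keys_modify]
          exact PySem.Dict.nodup_keys_insert _ _ _ hn
        obtain ⟨h1, h2⟩ := ih _ _ h hn'
        refine ⟨h1, le_trans ?_ h2⟩
        rw [pv_size_eq_keys_length, pv_size_eq_keys_length, PySem.Dict.keys_modify,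
          ← pv_size_eq_keys_length, ← pv_size_eq_keys_length, PySem.Dict.size_insert]
        split <;> omega
      · rw [if_neg hc] at h
        have hn' : (labels.insert a (1 : Int)).keys.Nodup :=
          PySem.Dict.nodup_keys_insert _ _ _ hn
        obtain ⟨h1, h2⟩ := ih _ _ h hn'
        refine ⟨h1, le_trans ?_ h2⟩
        rw [PySem.Dict.size_insert]; split <;> omega

-- the loop returns `some` when every neighbour is present
theorem pvCountLabels_total (d0 : PySem.Dict String String) :
    ∀ (ads : List String) (labels : PySem.Dict String Int),
      (∀ a ∈ ads, (d0.get? a).isSome = true) →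
      ∃ r, pvCountLabels d0 ads labels = some r := by
  intro ads
  induction ads with
  | nil => intro labels _; exact ⟨labels, rfl⟩
  | cons a rest ih =>
    intro labels hall
    have ha : (d0.get? a).isSome = true := hall a (by simp)
    cases hv : d0.get? a with
    | none => rw [hv] at ha; cases ha
    | some v =>
      obtain ⟨r, hr⟩ := ih (if labels.contains v then labels.modify v 0 (· + 1) else labels.insert a 1)
        (fun x hx => hall x (by simp [hx]))
      exact ⟨r, by simp only [pvCountLabels, hv]; exact hr⟩

-- last element of a stable insertion into a key-sorted list = B's scan step
theorem pv_getLast?_insertBy (x : String × Int) :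
    ∀ (acc : List (String × Int)), acc.Pairwise (fun a b => a.2 ≤ b.2) →
    (PySem.List.insertBy (fun a b => decide (a.2 < b.2)) x acc).getLast? =
      pvBestStep acc.getLast? x := by
  intro acc
  induction acc with
  | nil => intro _; rfl
  | cons y t ih =>
    intro hp
    rw [List.pairwise_cons] at hp
    by_cases hlt : x.2 < y.2
    · have hres : PySem.List.insertBy (fun a b => decide (a.2 < b.2)) x (y :: t) = x :: y :: t := by
        simp [PySem.List.insertBy, hlt]
      rw [hres]
      -- last of x :: y :: t is last of y :: t
      rw [List.getLast?_cons_cons]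
      -- the last element b of y :: t satisfies y.2 ≤ b.2, hence ¬ b.2 ≤ x.2
      obtain ⟨b, hb⟩ := Option.isSome_iff_exists.mp (show (y :: t).getLast?.isSome by simp [List.getLast?_isSome])
      have hbmem : b ∈ y :: t := List.mem_of_getLast? hb
      have hyb : y.2 ≤ b.2 := by
        rcases List.mem_cons.mp hbmem with h | h
        · rw [h]
        · exact hp.1 b h
      rw [hb]
      simp only [pvBestStep]
      rw [if_neg (by omega)]
    · have hres : PySem.List.insertBy (fun a b => decide (a.2 < b.2)) x (y :: t) =
          y :: PySem.List.insertBy (fun a b => decide (a.2 < b.2)) x t := by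
        simp [PySem.List.insertBy, hlt]
      rw [hres]
      cases hI : PySem.List.insertBy (fun a b => decide (a.2 < b.2)) x t with
      | nil => cases t <;> simp [PySem.List.insertBy] at hI <;> revert hI <;> split <;> simp
      | cons z s =>
        rw [List.getLast?_cons_cons]
        have hiht := ih hp.2
        rw [hI] at hiht
        rw [hiht]
        cases t with
        | nil =>
          simp only [List.getLast?_nil, List.getLast?_singleton, pvBestStep]
          rw [if_pos (by omega)]
        | cons w u => rw [List.getLast?_cons_cons]

-- the last element of Python's stable sort by count IS B's one-pass scan
theorem pv_getLast?_sorted_eq_scan :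
    ∀ (l : List (String × Int)),
      (PySem.List.sorted l (fun p => p.2)).getLast? = l.foldl pvBestStep none := by
  intro l
  induction l using List.reverseRecOn with
  | nil => rfl
  | append_singleton l x ih =>
    rw [PySem.List.sorted_eq_foldl_insertBy, List.foldl_append, ← PySem.List.sorted_eq_foldl_insertBy]
    simp only [List.foldl_cons, List.foldl_nil, List.foldl_append]
    rw [pv_getLast?_insertBy x _ (PySem.List.sorted_pairwise l (fun p => p.2)), ih]

-- ===== VERDICT (by name: the statement is the Claim_ definition above) =====
theorem label_mayor_frecuencia_py_spec : Claim_equal_label_mayor_frecuencia_py := by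
  intro vertice adyacentes label _ hpre
  unfold Spec_label_mayor_frecuencia_py
  obtain ⟨hne, hall⟩ := hpre
  set d0 := PySem.Dict.mk label with hd0
  obtain ⟨r, hr⟩ := pvCountLabels_total d0 adyacentes PySem.Dict.empty hall
  obtain ⟨hnodup, hsize⟩ := pvCountLabels_spec d0 adyacentes PySem.Dict.empty r hr (by simp [PySem.Dict.empty, PySem.Dict.keys])
  -- the table is nonempty: the first neighbour inserts one entry
  have hrpos : 1 ≤ r.size := by
    cases adyacentes with
    | nil => exact absurd rfl hne
    | cons a rest =>
      have ha : (d0.get? a).isSome = true := hall a (by simp)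
      cases hv : d0.get? a with
      | none => rw [hv] at ha; cases ha
      | some v =>
        simp only [pvCountLabels, hv] at hr
        rw [if_neg (by simp [PySem.Dict.contains_empty])] at hr
        obtain ⟨_, h2⟩ := pvCountLabels_spec d0 rest _ r hr
          (PySem.Dict.nodup_keys_insert _ _ _ (by simp [PySem.Dict.empty, PySem.Dict.keys]))
        have : (PySem.Dict.empty.insert a (1 : Int)).size = 1 := by
          rw [PySem.Dict.size_insert]; simp [PySem.Dict.empty, PySem.Dict.size]
        omega
  have hitems : r.items.length = r.size := rfl
  have hlne : r.items ≠ [] := by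
    intro h; rw [← hitems, h] at hrpos; simp at hrpos
  -- unfold both ports on the successful count
  unfold label_mayor_frecuencia_py label_mayor_frecuencia_py_alt
  rw [← hd0, hr]
  set lista := PySem.List.sorted r.items (fun p => p.2) with hlista
  have hlen : lista.length = r.items.length := PySem.List.length_sorted _ _ _
  have hlista_ne : lista ≠ [] := by
    rw [hlista, Ne, PySem.List.sorted_eq_nil_iff]; exact hlne
  have hlpos : 0 < lista.length := List.length_pos_iff.mpr hlista_ne
  -- index computations
  have hget0 : PySem.List.pyGet? lista 0 = some (lista[0]'hlpos) := by
    simp [PySem.List.pyGet?, PySem.List.pyIdx?, hlpos]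
  have hgetlast : PySem.List.pyGet? lista (-1) = some (lista[lista.length - 1]'(by omega)) := by
    simp only [PySem.List.pyGet?, PySem.List.pyIdx?]
    rw [if_neg (by omega), if_pos (by omega)]
    simp [List.getElem?_eq_getElem (show lista.length - 1 < lista.length by omega)]
  have hgetlen : PySem.List.pyGet? lista ((lista.length : Int) - 1) = some (lista[lista.length - 1]'(by omega)) := by
    simp only [PySem.List.pyGet?, PySem.List.pyIdx?]
    rw [if_pos (by omega), if_pos (by omega)]
    have : ((lista.length : Int) - 1).toNat = lista.length - 1 := by omega
    rw [this]
    simp [List.getElem?_eq_getElem (show lista.length - 1 < lista.length by omega)]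
  -- B's scan returns the last element of the sorted list
  have hscan : r.items.foldl pvBestStep none = some (lista[lista.length - 1]'(by omega)) := by
    rw [← pv_getLast?_sorted_eq_scan, ← hlista, List.getLast?_eq_getElem?,
      List.getElem?_eq_getElem (show lista.length - 1 < lista.length by omega)]
  show (match PySem.List.pyGet? lista 0, PySem.List.pyGet? lista (-1),
          PySem.List.pyGet? lista ((lista.length : Int) - 1) with
        | some a0, some an, some ax => (ax.1, decide (a0 = an))
        | _, _, _ => ("", false)) =
       (match r.items.foldl pvBestStep none with
        | none => ("", false)
        | some best => (best.1, decide (r.size = 1)))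
  simp only [hget0, hgetlast, hgetlen, hscan]
  -- the two booleans agree
  have hsortnodup : lista.Nodup := by
    have : r.items.Nodup := List.Nodup.of_map (fun p : String × Int => p.1) (show (r.items.map (fun p => p.1)).Nodup from hnodup)
    exact ((PySem.List.sorted_perm r.items (fun p => p.2) false).nodup_iff).mpr this
  have hbool : (lista[0]'hlpos = lista[lista.length - 1]'(by omega)) ↔ r.size = 1 := by
    constructor
    · intro h
      have := (hsortnodup.getElem_inj_iff).mp h
      omega
    · intro h
      have : lista.length - 1 = 0 := by omega
      simp [this]
  have : decide (lista[0]'hlpos = lista[lista.length - 1]'(by omega)) = decide (r.size = 1) := by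
    rw [decide_eq_decide]; exact hbool
  rw [this]
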